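-- pv_equiv track=rewrite | github.com/ExposuresProvider/ehr_prevalence | kg_creation/create_kg.py | get_normalized_id_and_name
-- ===== SOURCE A (Python) =====
-- def get_normalized_id_and_name(row_id, map_dict):
--     mapped_data = map_dict.get(row_id, {})
--     eid = label = ''
--     if mapped_data:
--         for eq_id in mapped_data['equivalent_identifiers']:
--             if not eid:
--                 eid = eq_id.get('identifier', '')
--             if not label:
--                 label = eq_id.get('label', '')
--             if eid and label:
--                 break
--
--     if eid and label:
--         return eid, label
--
--     return row_id, ''
-- ===== SOURCE B (Python) =====
-- def get_normalized_id_and_name(row_id, map_dict):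
--     mapped_data = map_dict.get(row_id, {})
--     eid = label = ''
--     if mapped_data:
--         eq_ids = mapped_data['equivalent_identifiers']
--         eid = next((i for e in eq_ids if (i := e.get('identifier', ''))), '')
--         label = next((l for e in eq_ids if (l := e.get('label', ''))), '')
--     if eid and label:
--         return eid, label
--     return row_id, ''
-- ===== Notes on version B (the rewrite author's own statement) =====
-- stated objective: idiomatic
-- what changed: Replaces the single stateful loop with break and two mutable accumulators by two independent first-match scans (next over a generator) for identifier and label.
import Mathlib
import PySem

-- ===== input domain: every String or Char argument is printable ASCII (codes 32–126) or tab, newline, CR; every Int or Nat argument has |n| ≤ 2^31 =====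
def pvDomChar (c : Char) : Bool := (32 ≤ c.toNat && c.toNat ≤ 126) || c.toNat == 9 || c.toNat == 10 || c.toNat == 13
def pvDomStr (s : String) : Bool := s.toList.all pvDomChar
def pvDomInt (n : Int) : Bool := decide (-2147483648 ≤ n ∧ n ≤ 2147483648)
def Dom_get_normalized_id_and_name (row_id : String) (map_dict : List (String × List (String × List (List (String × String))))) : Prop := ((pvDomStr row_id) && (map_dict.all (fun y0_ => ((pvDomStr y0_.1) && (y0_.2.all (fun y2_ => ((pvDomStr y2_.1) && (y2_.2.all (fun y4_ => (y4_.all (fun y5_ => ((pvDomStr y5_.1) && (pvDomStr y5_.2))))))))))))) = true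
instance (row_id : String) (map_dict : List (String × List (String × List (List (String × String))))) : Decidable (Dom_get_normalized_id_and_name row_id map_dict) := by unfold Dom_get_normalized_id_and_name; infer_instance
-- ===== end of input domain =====

-- B replaces A's single stateful loop (two accumulators + break) by two independent first-match scans; objective: idiomatic, same cost.


-- ===== PORT A =====
-- A's loop over equivalent_identifiers with two accumulators and break
def pvGoA : List (List (String × String)) → String → String → String × String
  | [], eid, label => (eid, label)
  | eq :: rest, eid, label =>
    let eid := if eid = "" then (PySem.Dict.ofList eq).getD "identifier" "" else eid
    let label := if label = "" then (PySem.Dict.ofList eq).getD "label" "" else label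
    if eid ≠ "" ∧ label ≠ "" then (eid, label) else pvGoA rest eid label

def get_normalized_id_and_name (row_id : String) (map_dict : List (String × List (String × List (List (String × String))))) : String × String :=
  let mapped_data := (PySem.Dict.ofList map_dict).getD row_id []
  let p := if mapped_data ≠ [] then
      pvGoA ((PySem.Dict.ofList mapped_data).getD "equivalent_identifiers" []) "" ""
    else ("", "")
  if p.1 ≠ "" ∧ p.2 ≠ "" then p else (row_id, "")

-- ===== PORT B =====
-- B: first element of the scan with a non-empty value under `key` (port of next(...) over a generator)
def pvFirst (key : String) : List (List (String × String)) → String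
  | [] => ""
  | e :: rest =>
    let v := (PySem.Dict.ofList e).getD key ""
    if v ≠ "" then v else pvFirst key rest

def get_normalized_id_and_name_alt (row_id : String) (map_dict : List (String × List (String × List (List (String × String))))) : String × String :=
  let mapped_data := (PySem.Dict.ofList map_dict).getD row_id []
  let eid := if mapped_data ≠ [] then
      pvFirst "identifier" ((PySem.Dict.ofList mapped_data).getD "equivalent_identifiers" []) else ""
  let label := if mapped_data ≠ [] then
      pvFirst "label" ((PySem.Dict.ofList mapped_data).getD "equivalent_identifiers" []) else ""
  if eid ≠ "" ∧ label ≠ "" then (eid, label) else (row_id, "")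

-- ===== PRECONDITION & SPEC =====
-- Pre_ excludes exactly the inputs where Python A raises KeyError: row_id maps to a
-- non-empty dict that lacks the key 'equivalent_identifiers' (B raises there too).
def Pre_get_normalized_id_and_name (row_id : String) (map_dict : List (String × List (String × List (List (String × String))))) : Prop :=
  (PySem.Dict.ofList map_dict).getD row_id [] ≠ [] →
    ((PySem.Dict.ofList ((PySem.Dict.ofList map_dict).getD row_id [])).get? "equivalent_identifiers").isSome = true
instance (row_id : String) (map_dict : List (String × List (String × List (List (String × String))))) : Decidable (Pre_get_normalized_id_and_name row_id map_dict) := by unfold Pre_get_normalized_id_and_name; infer_instance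

def pvWitness_get_normalized_id_and_name : String × (List (String × List (String × List (List (String × String))))) :=
  ("x", [("x", [("equivalent_identifiers", [[("identifier", "a"), ("label", "b")]])])])
-- ===== PRECONDITION & SPEC =====
def Spec_get_normalized_id_and_name (row_id : String) (map_dict : List (String × List (String × List (List (String × String))))) (out : String × String) : Prop := out = get_normalized_id_and_name_alt row_id map_dict
instance (row_id : String) (map_dict : List (String × List (String × List (List (String × String))))) (out : String × String) : Decidable (Spec_get_normalized_id_and_name row_id map_dict out) := by unfold Spec_get_normalized_id_and_name; infer_instance

-- ===== CLAIM (what is proved, stated in full; the proofs are below) =====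
def Claim_equal_get_normalized_id_and_name : Prop := ∀ (row_id : String) (map_dict : List (String × List (String × List (List (String × String))))), Dom_get_normalized_id_and_name row_id map_dict → Pre_get_normalized_id_and_name row_id map_dict → Spec_get_normalized_id_and_name row_id map_dict (get_normalized_id_and_name row_id map_dict)

-- ===== LEMMAS AND PROOFS =====
lemma pvGoA_eq (xs : List (List (String × String))) (eid label : String) :
    pvGoA xs eid label =
      ((if eid = "" then pvFirst "identifier" xs else eid),
       (if label = "" then pvFirst "label" xs else label)) := by
  induction xs generalizing eid label with
  | nil => simp [pvGoA, pvFirst]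
  | cons e rest ih =>
    simp only [pvGoA, pvFirst, ih]
    split_ifs <;> simp_all


-- ===== VERDICT (by name: the statement is the Claim_ definition above) =====
theorem get_normalized_id_and_name_spec : Claim_equal_get_normalized_id_and_name := by
  intro row_id map_dict _ _
  unfold Spec_get_normalized_id_and_name get_normalized_id_and_name get_normalized_id_and_name_alt
  by_cases h : (PySem.Dict.ofList map_dict).getD row_id [] = []
  · simp [h]
  · simp only [h, ne_eq, not_false_eq_true, if_true, pvGoA_eq]
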